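-- pv_equiv track=rewrite | github.com/nbonfils/adventofcode2018 | day2/inventory_part1.py | check_double_triple
-- ===== SOURCE A (Python) =====
-- def check_double_triple(ID):
--     double = 0
--     triple = 0
--     for letter in ID:
--         count = ID.count(letter)
--         if count == 2:
--             double = 1
--         elif count == 3:
--             triple = 1
--
--     return double, triple
-- ===== SOURCE B (Python) =====
-- def check_double_triple(ID):
--     double = 0
--     triple = 0
--     s = sorted(ID)
--     i = 0
--     n = len(s)
--     while i < n:
--         j = i
--         while j < n and s[j] == s[i]:
--             j += 1
--         run = j - i
--         if run == 2:
--             double = 1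
--         if run == 3:
--             triple = 1
--         i = j
--     return double, triple
-- ===== Notes on version B (the rewrite author's own statement) =====
-- stated objective: faster
-- what changed: B sorts the ID once and scans contiguous runs of equal letters with an index-based run-length counter, setting the flags from each run length, instead of A's per-letter rescan of the whole string with str.count.
import Mathlib
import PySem

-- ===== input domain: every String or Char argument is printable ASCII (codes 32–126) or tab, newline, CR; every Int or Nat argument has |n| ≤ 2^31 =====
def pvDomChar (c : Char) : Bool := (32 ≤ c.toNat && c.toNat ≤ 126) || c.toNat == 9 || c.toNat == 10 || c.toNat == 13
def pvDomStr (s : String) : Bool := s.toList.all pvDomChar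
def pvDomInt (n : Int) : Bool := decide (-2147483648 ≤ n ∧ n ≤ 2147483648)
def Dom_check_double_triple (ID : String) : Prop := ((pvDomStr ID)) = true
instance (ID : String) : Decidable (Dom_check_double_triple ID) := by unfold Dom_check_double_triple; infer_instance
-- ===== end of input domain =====

-- B sorts the ID once and scans contiguous runs of equal letters instead of rescanning the whole string per letter with str.count.


-- ===== PORT A =====
def check_double_triple (ID : String) : Int × Int :=
  ID.toList.foldl (fun (st : Int × Int) letter =>
    let count := PySem.Str.count ID (String.singleton letter)
    if count = 2 then (1, st.2)
    else if count = 3 then (st.1, 1)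
    else st) (0, 0)

-- ===== PORT B =====
-- outer while loop of Source B: one step per contiguous run of equal letters of the
-- sorted list; the inner while (j advancing over the equal letters) is the takeWhile.
def pvRuns : List Char → Int → Int → Int × Int
  | [], double, triple => (double, triple)
  | c :: rest, double, triple =>
      let run : Int := 1 + (rest.takeWhile (· == c)).length
      pvRuns (rest.dropWhile (· == c))
        (if run = 2 then 1 else double)
        (if run = 3 then 1 else triple)
termination_by l => l.length
decreasing_by
  simpa using Nat.lt_succ_of_le (List.length_dropWhile_le _ _)

def check_double_triple_alt (ID : String) : Int × Int :=
  pvRuns (PySem.List.sorted ID.toList (fun x => x) false) 0 0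

-- ===== PRECONDITION & SPEC =====
def Spec_check_double_triple (ID : String) (out : Int × Int) : Prop := out = check_double_triple_alt ID
instance (ID : String) (out : Int × Int) : Decidable (Spec_check_double_triple ID out) := by unfold Spec_check_double_triple; infer_instance

-- ===== CLAIM (what is proved, stated in full; the proofs are below) =====
def Claim_equal_check_double_triple : Prop := ∀ (ID : String), Dom_check_double_triple ID → Spec_check_double_triple ID (check_double_triple ID)

-- ===== LEMMAS AND PROOFS =====

-- the common characterisation both ports are reduced to:
-- flag k = 1 iff some letter occurs exactly k times in the string
def pvFlag (l : List Char) (k : Nat) : Int := if ∃ c ∈ l, l.count c = k then 1 else 0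

theorem pvIfOr {A B : Prop} [Decidable A] [Decidable B] (d : Int) :
    (if A then (1:Int) else if B then 1 else d) = if B ∨ A then 1 else d := by
  by_cases hA : A <;> by_cases hB : B <;> simp [hA, hB]

-- str.count with a single-character needle is List.count
theorem pvCountGo_single (c : Char) : ∀ (l : List Char) (acc : Nat),
    PySem.Chars.count.go [c] l.length l acc = acc + l.count c := by
  intro l
  induction l with
  | nil => intro acc; simp [PySem.Chars.count.go]
  | cons h t ih =>
      intro acc
      rw [List.length_cons, PySem.Chars.count.go]
      by_cases hc : h = c
      · simp [hc, List.isPrefixOf, ih]; omega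
      · simp [List.isPrefixOf, hc, Ne.symm hc, ih]

theorem pvCount_single (l : List Char) (c : Char) :
    PySem.Chars.count l [c] = l.count c := by
  simpa [PySem.Chars.count] using pvCountGo_single c l 0

-- A's fold: the flags record whether some letter of the scanned portion has count 2 / 3 in l
theorem pvFoldA (l m : List Char) (d t : Int) :
    m.foldl (fun (st : Int × Int) letter =>
      if l.count letter = 2 then (1, st.2)
      else if l.count letter = 3 then (st.1, 1)
      else st) (d, t)
    = ((if ∃ c ∈ m, l.count c = 2 then 1 else d),
       (if ∃ c ∈ m, l.count c = 3 then 1 else t)) := by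
  induction m generalizing d t with
  | nil => simp
  | cons h tl ih =>
      simp only [List.foldl_cons, List.exists_mem_cons_iff]
      by_cases h2 : l.count h = 2
      · have h3 : l.count h ≠ 3 := by omega
        simp [ih, h2, h3]
      · by_cases h3 : l.count h = 3
        · simp [ih, h3]
        · simp [ih, h2, h3]

theorem checkA_eq (ID : String) :
    check_double_triple ID = (pvFlag ID.toList 2, pvFlag ID.toList 3) := by
  have hA : check_double_triple ID
      = ID.toList.foldl (fun (st : Int × Int) letter =>
          if ID.toList.count letter = 2 then (1, st.2)
          else if ID.toList.count letter = 3 then (st.1, 1)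
          else st) (0, 0) := by
    unfold check_double_triple
    simp [pvCount_single]
  rw [hA, pvFoldA]
  rfl

-- c does not occur after its own run in a sorted list
theorem pvNotMemDrop (c : Char) (rest : List Char)
    (hp : (c :: rest).Pairwise (· ≤ ·)) : c ∉ rest.dropWhile (· == c) := by
  intro hmem
  rcases hd : rest.dropWhile (· == c) with _ | ⟨d0, dr'⟩
  · simp [hd] at hmem
  · have hne : (d0 == c) = false := by
      have := List.head_dropWhile_not (· == c) (l := rest) (by simp [hd])
      simpa [hd] using this
    have hne' : d0 ≠ c := by simpa using hne
    have hsub : (rest.dropWhile (· == c)).Sublist rest := List.dropWhile_sublist _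
    have hpr : rest.Pairwise (· ≤ ·) := (List.pairwise_cons.mp hp).2
    have hpd : (d0 :: dr').Pairwise (· ≤ ·) := hd ▸ hpr.sublist hsub
    have hcle : c ≤ d0 := by
      have hmemr : d0 ∈ rest := hsub.mem (by simp [hd])
      exact (List.pairwise_cons.mp hp).1 d0 hmemr
    rw [hd] at hmem
    rcases List.mem_cons.mp hmem with h | h
    · exact hne' h.symm
    · have : d0 ≤ c := (List.pairwise_cons.mp hpd).1 c h
      exact hne' (le_antisymm this hcle)

-- B's run scan on a sorted list computes the same flags
theorem pvRunsSorted : ∀ (n : Nat) (s : List Char), s.length ≤ n →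
    s.Pairwise (· ≤ ·) → ∀ (d t : Int),
    pvRuns s d t
    = ((if ∃ c ∈ s, s.count c = 2 then 1 else d),
       (if ∃ c ∈ s, s.count c = 3 then 1 else t)) := by
  intro n
  induction n with
  | zero =>
      intro s hs _ d t
      have : s = [] := List.eq_nil_of_length_eq_zero (Nat.le_zero.mp hs)
      subst this; simp [pvRuns]
  | succ n ih =>
      intro s hlen hp d t
      match s with
      | [] => simp [pvRuns]
      | c :: rest =>
        set tk := rest.takeWhile (· == c) with htk
        set dr := rest.dropWhile (· == c) with hdr
        have hrest : tk ++ dr = rest := List.takeWhile_append_dropWhile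
        have htkc : ∀ x ∈ tk, x = c := fun x hx => by
          simpa using List.mem_takeWhile_imp hx
        have hcdr : c ∉ dr := pvNotMemDrop c rest hp
        have hdrsub : dr.Sublist rest := List.dropWhile_sublist _
        have hpr : rest.Pairwise (· ≤ ·) := (List.pairwise_cons.mp hp).2
        have hpd : dr.Pairwise (· ≤ ·) := hpr.sublist hdrsub
        have hdlen : dr.length ≤ n := by
          have := List.length_dropWhile_le (· == c) rest
          have : dr.length ≤ rest.length := this
          simp at hlen; omega
        have hcount_c : (c :: rest).count c = 1 + tk.length := by
          rw [← hrest, List.count_cons_self, List.count_append]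
          have h1 : tk.count c = tk.length :=
            List.count_eq_length.mpr (fun b hb => (htkc b hb).symm)
          have h2 : dr.count c = 0 := List.count_eq_zero.mpr hcdr
          omega
        have hcount_dr : ∀ x ∈ dr, (c :: rest).count x = dr.count x := by
          intro x hx
          have hxc : x ≠ c := fun h => hcdr (h ▸ hx)
          have htkx : tk.count x = 0 := List.count_eq_zero.mpr
            (fun hmem => hxc (htkc x hmem))
          rw [← hrest]
          simp [List.count_append, Ne.symm hxc, htkx]
        have hsplit : ∀ k : Nat,
            (∃ x ∈ c :: rest, (c :: rest).count x = k)
              ↔ ((c :: rest).count c = k ∨ ∃ x ∈ dr, dr.count x = k) := by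
          intro k
          constructor
          · rintro ⟨x, hx, hcx⟩
            rcases List.mem_cons.mp hx with h | h
            · exact Or.inl (h ▸ hcx)
            · rw [← hrest] at h
              rcases List.mem_append.mp h with h | h
              · exact Or.inl ((htkc x h) ▸ hcx)
              · exact Or.inr ⟨x, h, (hcount_dr x h).symm ▸ hcx⟩
          · rintro (h | ⟨x, hx, hcx⟩)
            · exact ⟨c, List.mem_cons_self, h⟩
            · refine ⟨x, ?_, by rw [hcount_dr x hx]; exact hcx⟩
              exact List.mem_cons_of_mem _ (by rw [← hrest]; exact List.mem_append_right _ hx)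
        rw [pvRuns, ih dr hdlen hpd]
        simp only [← htk]
        have hrun2 : ((1 + (tk.length : Int)) = 2) ↔ (c :: rest).count c = 2 := by
          rw [hcount_c]; omega
        have hrun3 : ((1 + (tk.length : Int)) = 3) ↔ (c :: rest).count c = 3 := by
          rw [hcount_c]; omega
        have e2 := (hsplit 2).trans (or_congr hrun2.symm Iff.rfl)
        have e3 := (hsplit 3).trans (or_congr hrun3.symm Iff.rfl)
        simp only [e2, e3, pvIfOr]

theorem checkB_eq (ID : String) :
    check_double_triple_alt ID = (pvFlag ID.toList 2, pvFlag ID.toList 3) := by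
  unfold check_double_triple_alt pvFlag
  set s := PySem.List.sorted ID.toList (fun x => x) false with hs
  have hperm : s.Perm ID.toList := PySem.List.sorted_perm _ _ _
  have hpair : s.Pairwise (· ≤ ·) := PySem.List.sorted_pairwise ID.toList (fun x => x)
  rw [pvRunsSorted s.length s le_rfl hpair]
  have key : ∀ k : Nat, (∃ c ∈ s, s.count c = k) ↔ ∃ c ∈ ID.toList, ID.toList.count c = k := by
    intro k
    constructor <;> rintro ⟨c, hc, hcnt⟩
    · exact ⟨c, hperm.mem_iff.mp hc, by rw [← hperm.count_eq]; exact hcnt⟩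
    · exact ⟨c, hperm.mem_iff.mpr hc, by rw [hperm.count_eq]; exact hcnt⟩
  simp only [key]

-- ===== VERDICT (by name: the statement is the Claim_ definition above) =====
theorem check_double_triple_spec : Claim_equal_check_double_triple := by
  intro ID _
  unfold Spec_check_double_triple
  rw [checkA_eq, checkB_eq]
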